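-- pv_equiv track=rewrite | github.com/cgvvxx/PS | ps/etc/044_P_베스트앨범.py | solution
-- ===== SOURCE A (Python) =====
-- def sum_second(list):
--     list_sum = 0
--     for i, j in list:
--         list_sum += j
--
--     return list_sum
--
-- def solution(genres, plays):
--     song_dict = dict()
--
--     for i in range(len(genres)):
--         try:
--             song_dict[genres[i]].append((i, plays[i]))
--         except:
--             song_dict[genres[i]] = [(i, plays[i])]
--
--     high = [(idx, sum_second(val)) for idx, val in enumerate(song_dict.values())]
--     high.sort(key=lambda x: x[1], reverse=True)
--
--     ans = []
--     dict_keys = list(song_dict.keys())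
--
--     for i in range(len(song_dict)):
--         cat_list = song_dict[dict_keys[high[i][0]]]
--         if len(cat_list) == 1:
--             ans.append(cat_list[0][0])
--         else:
--             cat_list.sort(key=lambda x: x[1], reverse=True)
--             ans.append(cat_list[0][0])
--             ans.append(cat_list[1][0])
--
--     return ans
-- ===== SOURCE B (Python) =====
-- def solution(genres, plays):
--     total = {}
--     first = {}
--     for i, (g, p) in enumerate(zip(genres, plays)):
--         total[g] = total.get(g, 0) + p
--         if g not in first:
--             first[g] = i
--     order = sorted(range(len(genres)),
--                    key=lambda i: (-total[genres[i]], first[genres[i]], -plays[i], i))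
--     ans = []
--     count = {}
--     for i in order:
--         g = genres[i]
--         c = count.get(g, 0)
--         if c < 2:
--             ans.append(i)
--             count[g] = c + 1
--     return ans
-- ===== Notes on version B (the rewrite author's own statement) =====
-- stated objective: alternative
-- what changed: Replaces the dict-of-lists grouping with a per-genre sort inside the output loop by one global sort of all song indices under the composite key (-genre_total, genre_first_index, -plays, index) followed by a single counter-limited pass that keeps at most two songs per genre.
import Mathlib
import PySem

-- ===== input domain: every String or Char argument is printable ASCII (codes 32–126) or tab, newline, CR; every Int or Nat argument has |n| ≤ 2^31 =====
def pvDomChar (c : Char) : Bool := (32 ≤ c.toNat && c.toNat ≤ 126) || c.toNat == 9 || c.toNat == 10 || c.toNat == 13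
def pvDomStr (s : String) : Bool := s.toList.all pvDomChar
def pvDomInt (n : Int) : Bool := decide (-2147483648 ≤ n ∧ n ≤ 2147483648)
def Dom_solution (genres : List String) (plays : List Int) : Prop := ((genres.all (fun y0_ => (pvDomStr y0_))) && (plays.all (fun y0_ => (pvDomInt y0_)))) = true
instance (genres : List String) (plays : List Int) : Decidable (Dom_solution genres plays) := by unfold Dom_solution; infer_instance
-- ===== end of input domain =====

-- B replaces A's dict-of-lists grouping and per-genre sorting by one global sort of all
-- song indices under a composite lexicographic key plus a single counter-limited pass.
-- (A sorts its internal per-genre lists in place; neither version mutates its arguments.)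

-- ===== PORT A =====

-- helper sum_second: sums the second components
def sumSecond (l : List (Int × Int)) : Int :=
  l.foldl (fun s x => s + x.2) 0

-- literal port of A.  genres[i] / plays[i] are ported with pyGetD: every index drawn from
-- range(len(genres)) is in range for genres, and in range for plays under Pre_solution.
-- song_dict[...] lookups in the output loop are ported with getD (the keys always exist).
def solution (genres : List String) (plays : List Int) : List Int :=
  let song_dict : PySem.Dict String (List (Int × Int)) :=
    (PySem.List.pyRange 0 (PySem.List.len genres)).foldl (fun d i =>
      match d.get? (PySem.List.pyGetD genres i "") with
      | some l => d.insert (PySem.List.pyGetD genres i "")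
          (l ++ [(i, PySem.List.pyGetD plays i 0)])                 -- try: append
      | none   => d.insert (PySem.List.pyGetD genres i "")
          [(i, PySem.List.pyGetD plays i 0)]) PySem.Dict.empty      -- except: fresh list
  let high := (PySem.List.enumerate song_dict.values).map (fun iv => (iv.1, sumSecond iv.2))
  let highS := PySem.List.sorted high (fun x => x.2) true
  let dict_keys := song_dict.keys
  (PySem.List.pyRange 0 (song_dict.size : Int)).foldl (fun ans i =>
    let cat := song_dict.getD
      (PySem.List.pyGetD dict_keys (PySem.List.pyGetD highS i (0, 0)).1 "") []
    if cat.length == 1 then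
      ans ++ [(PySem.List.pyGetD cat 0 (0, 0)).1]
    else
      ans ++ [(PySem.List.pyGetD (PySem.List.sorted cat (fun x => x.2) true) 0 (0, 0)).1,
              (PySem.List.pyGetD (PySem.List.sorted cat (fun x => x.2) true) 1 (0, 0)).1]) []

-- ===== PORT B =====

-- literal port of B (Source B).  The Python tuple sort key is ported as a nested
-- lexicographic product (toLex), which is exactly Python's tuple comparison on ints.
def solution_alt (genres : List String) (plays : List Int) : List Int :=
  let tf := (PySem.List.enumerate (genres.zip plays)).foldl
    (fun (tf : PySem.Dict String Int × PySem.Dict String Int) x =>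
      (tf.1.modify x.2.1 0 (· + x.2.2),                              -- total[g] = total.get(g,0)+p
       if tf.2.contains x.2.1 then tf.2 else tf.2.insert x.2.1 x.1)) -- if g not in first: first[g]=i
    (PySem.Dict.empty, PySem.Dict.empty)
  let order := PySem.List.sorted (PySem.List.pyRange 0 (PySem.List.len genres))
    (fun i => toLex (-(tf.1.getD (PySem.List.pyGetD genres i "") 0),
       toLex (tf.2.getD (PySem.List.pyGetD genres i "") 0,
         toLex (-(PySem.List.pyGetD plays i 0), i)))) false
  (order.foldl (fun (ac : List Int × PySem.Dict String Int) i =>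
      if ac.2.getD (PySem.List.pyGetD genres i "") 0 < 2 then
        (ac.1 ++ [i], ac.2.insert (PySem.List.pyGetD genres i "")
          (ac.2.getD (PySem.List.pyGetD genres i "") 0 + 1))
      else ac) ([], PySem.Dict.empty)).1

-- ===== PRECONDITION & SPEC =====

-- A raises IndexError (uncaught, re-raised inside its bare except) as soon as it needs
-- plays[i] for an i beyond len(plays); B raises there too (KeyError/IndexError).
def Pre_solution (genres : List String) (plays : List Int) : Prop :=
  genres.length ≤ plays.length

instance (genres : List String) (plays : List Int) : Decidable (Pre_solution genres plays) := by
  unfold Pre_solution; infer_instance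

def pvWitness_solution : List String × List Int := (["a", "b", "a"], [10, 20, 5])

def Spec_solution (genres : List String) (plays : List Int) (out : List Int) : Prop :=
  out = solution_alt genres plays

instance (genres : List String) (plays : List Int) (out : List Int) :
    Decidable (Spec_solution genres plays out) := by unfold Spec_solution; infer_instance

-- ===== CLAIM (what is proved, stated in full; the proofs are below) =====
def Claim_equal_solution : Prop := ∀ (genres : List String) (plays : List Int),
  Dom_solution genres plays → Pre_solution genres plays →
  Spec_solution genres plays (solution genres plays)

-- ===== LEMMAS AND PROOFS =====

-- canonical description shared by both proofs ------------------------------------------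

def gI (genres : List String) (i : Int) : String := PySem.List.pyGetD genres i ""
def pI (plays : List Int) (i : Int) : Int := PySem.List.pyGetD plays i 0
def rngL (genres : List String) : List Int := PySem.List.pyRange 0 (PySem.List.len genres)
def idxsOf (genres : List String) (g : String) : List Int :=
  (rngL genres).filter (fun i => gI genres i == g)
def totOf (genres : List String) (plays : List Int) (g : String) : Int :=
  ((idxsOf genres g).map (pI plays)).sum
def fIdx (genres : List String) (g : String) : Int := (idxsOf genres g).headD 0
def keysOf (genres : List String) : List String := PySem.Set.ofList genres
def songKey (plays : List Int) (i : Int) : Int ×ₗ Int := toLex (-(pI plays i), i)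
def sIdxs (genres : List String) (plays : List Int) (g : String) : List Int :=
  PySem.List.sorted (idxsOf genres g) (songKey plays) false
def gKey (genres : List String) (plays : List Int) (g : String) : Int ×ₗ Int :=
  toLex (-(totOf genres plays g), fIdx genres g)
def cgOf (genres : List String) (plays : List Int) : List String :=
  PySem.List.sorted (keysOf genres) (gKey genres plays) false
def grpOf (genres : List String) (plays : List Int) (g : String) : List (Int × Int) :=
  (idxsOf genres g).map (fun i => (i, pI plays i))
def ansC (genres : List String) (plays : List Int) : List Int :=
  (cgOf genres plays).flatMap (fun g => (sIdxs genres plays g).take 2)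

-- stable-sort machinery -----------------------------------------------------------------

theorem insertBy_congr {α : Type} (p q : α → α → Bool) (x : α) :
    ∀ acc : List α, (∀ y ∈ acc, p x y = q x y) →
    PySem.List.insertBy p x acc = PySem.List.insertBy q x acc := by
  intro acc
  induction acc with
  | nil => intro _; rfl
  | cons y ys ih =>
    intro h
    simp only [PySem.List.insertBy, h y (List.mem_cons_self)]
    split
    · rfl
    · simp only [List.cons.injEq, true_and]
      exact ih (fun z hz => h z (List.mem_cons_of_mem _ hz))

theorem foldl_insertBy_rel {α : Type} (p q : α → α → Bool) (R : α → α → Prop)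
    (hpq : ∀ x y, R y x → p x y = q x y) :
    ∀ (xs acc : List α), xs.Pairwise R → (∀ y ∈ acc, ∀ x ∈ xs, R y x) →
    xs.foldl (fun acc x => PySem.List.insertBy p x acc) acc =
      xs.foldl (fun acc x => PySem.List.insertBy q x acc) acc := by
  intro xs
  induction xs with
  | nil => intro acc _ _; rfl
  | cons x t ih =>
    intro acc hp hacc
    simp only [List.foldl_cons]
    rw [insertBy_congr p q x acc (fun y hy => hpq x y (hacc y hy x (List.mem_cons_self)))]
    refine ih _ hp.of_cons ?_
    intro y hy x' hx'
    rcases (PySem.List.mem_insertBy _ _ _ _).1 hy with h | h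
    · subst h; exact (List.pairwise_cons.1 hp).1 x' hx'
    · exact hacc y h x' (List.mem_cons_of_mem _ hx')

theorem sorted_congr {α κ : Type} [LT κ] [DecidableLT κ] (xs : List α) (k1 k2 : α → κ)
    (rev : Bool) (h : ∀ x ∈ xs, k1 x = k2 x) :
    PySem.List.sorted xs k1 rev = PySem.List.sorted xs k2 rev := by
  have hpw : xs.Pairwise (fun a b : α => (k1 a = k2 a) ∧ (k1 b = k2 b)) :=
    List.pairwise_of_forall_mem_list (fun a ha b hb => ⟨h a ha, h b hb⟩)
  cases rev
  · rw [PySem.List.sorted_eq_foldl_insertBy, PySem.List.sorted_eq_foldl_insertBy]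
    refine foldl_insertBy_rel _ _ (fun y x : α => (k1 y = k2 y) ∧ (k1 x = k2 x)) ?_ xs []
      hpw (by simp)
    intro x y hR; rw [hR.1, hR.2]
  · rw [PySem.List.sorted_rev_eq_foldl_insertBy, PySem.List.sorted_rev_eq_foldl_insertBy]
    refine foldl_insertBy_rel _ _ (fun y x : α => (k1 y = k2 y) ∧ (k1 x = k2 x)) ?_ xs []
      hpw (by simp)
    intro x y hR; rw [hR.1, hR.2]

-- a STABLE reverse sort by key, on a list whose f-values strictly increase, is the
-- (unique) ascending sort by the lexicographic pair (-key, f)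
theorem stable_rev_lex {α : Type} (xs : List α) (key f : α → Int)
    (hf : xs.Pairwise (fun a b => f a < f b)) :
    PySem.List.sorted xs key true =
      PySem.List.sorted xs (fun a => toLex (-(key a), f a)) false := by
  rw [PySem.List.sorted_rev_eq_foldl_insertBy, PySem.List.sorted_eq_foldl_insertBy]
  refine foldl_insertBy_rel _ _ (fun y x : α => key x = key y → f y < f x) ?_ xs []
    (List.Pairwise.imp (fun {a b} (h : f a < f b) (_ : key b = key a) => h) hf) (by simp)
  intro x y hR
  simp only [decide_eq_decide, Prod.Lex.toLex_lt_toLex]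
  omega

-- basic facts about the canonical data --------------------------------------------------

theorem gI_getElem (genres : List String) (k : Nat) (h : k < genres.length) :
    gI genres (k : Int) = genres[k] := by
  unfold gI
  rw [PySem.List.pyGetD_eq_getElem genres "" (by omega) (by exact_mod_cast h)]
  simp

theorem pI_getElem (plays : List Int) (k : Nat) (h : k < plays.length) :
    pI plays (k : Int) = plays[k] := by
  unfold pI
  rw [PySem.List.pyGetD_eq_getElem plays 0 (by omega) (by exact_mod_cast h)]
  simp

theorem mem_rngL (genres : List String) (i : Int) :
    i ∈ rngL genres ↔ 0 ≤ i ∧ i < (genres.length : Int) := by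
  unfold rngL
  rw [PySem.List.mem_pyRange_one]
  simp [PySem.List.len_eq]

theorem mem_idxsOf (genres : List String) (g : String) (i : Int) :
    i ∈ idxsOf genres g ↔ (0 ≤ i ∧ i < (genres.length : Int)) ∧ gI genres i = g := by
  unfold idxsOf
  rw [List.mem_filter, mem_rngL]
  simp

theorem gI_mem (genres : List String) (i : Int) (h0 : 0 ≤ i) (h1 : i < (genres.length : Int)) :
    gI genres i ∈ genres := by
  have : gI genres i = genres[i.toNat]'(by omega) := by
    unfold gI; rw [PySem.List.pyGetD_eq_getElem genres "" h0 h1]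
  rw [this]; exact List.getElem_mem _

theorem idxsOf_pairwise (genres : List String) (g : String) :
    (idxsOf genres g).Pairwise (· < ·) :=
  (PySem.List.pairwise_lt_pyRange_one 0 _).filter _

theorem idxsOf_nodup (genres : List String) (g : String) : (idxsOf genres g).Nodup :=
  (idxsOf_pairwise genres g).imp (fun h => ne_of_lt h)

theorem idxsOf_ne_nil (genres : List String) (g : String) (h : g ∈ genres) :
    idxsOf genres g ≠ [] := by
  obtain ⟨k, hk, rfl⟩ := List.getElem_of_mem h
  intro hnil
  have : (k : Int) ∈ idxsOf genres genres[k] := by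
    rw [mem_idxsOf]
    exact ⟨⟨by omega, by exact_mod_cast hk⟩, gI_getElem genres k hk⟩
  rw [hnil] at this; exact absurd this (List.not_mem_nil)

theorem fIdx_mem (genres : List String) (g : String) (h : g ∈ genres) :
    fIdx genres g ∈ idxsOf genres g := by
  unfold fIdx
  cases hl : idxsOf genres g with
  | nil => exact absurd hl (idxsOf_ne_nil genres g h)
  | cons a t => simp

theorem gI_fIdx (genres : List String) (g : String) (h : g ∈ genres) :
    gI genres (fIdx genres g) = g :=
  ((mem_idxsOf genres g _).1 (fIdx_mem genres g h)).2

theorem fIdx_inj (genres : List String) (a b : String) (ha : a ∈ genres) (hb : b ∈ genres)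
    (h : fIdx genres a = fIdx genres b) : a = b := by
  rw [← gI_fIdx genres a ha, ← gI_fIdx genres b hb, h]

-- the distinct genres, in first-appearance order, have increasing first indices ---------

theorem gI_append_lt (gs : List String) (x : String) (i : Int) (h0 : 0 ≤ i)
    (h1 : i < (gs.length : Int)) : gI (gs ++ [x]) i = gI gs i := by
  unfold gI
  rw [PySem.List.pyGetD_eq_getElem (gs ++ [x]) "" h0 (by simp; omega),
    PySem.List.pyGetD_eq_getElem gs "" h0 h1]
  rw [List.getElem_append_left (by omega)]

theorem gI_append_last (gs : List String) (x : String) :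
    gI (gs ++ [x]) (gs.length : Int) = x := by
  have h := gI_getElem (gs ++ [x]) gs.length (by simp)
  rw [h]; simp

theorem idxsOf_append (gs : List String) (x : String) (g : String) :
    idxsOf (gs ++ [x]) g =
      idxsOf gs g ++ (if x = g then [(gs.length : Int)] else []) := by
  unfold idxsOf rngL
  have hlen : PySem.List.len (gs ++ [x]) = (gs.length : Int) + 1 := by
    simp [PySem.List.len_eq]
  have hlen2 : PySem.List.len gs = (gs.length : Int) := by simp [PySem.List.len_eq]
  rw [hlen, hlen2, PySem.List.pyRange_one_succ_right (by omega : (0:Int) ≤ (gs.length : Int)),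
    List.filter_append]
  congr 1
  · apply List.filter_congr
    intro i hi
    rw [PySem.List.mem_pyRange_one] at hi
    rw [gI_append_lt gs x i hi.1 hi.2]
  · rw [List.filter_singleton, gI_append_last]
    by_cases hxg : x = g
    · simp [hxg]
    · simp [beq_false_of_ne hxg, hxg]

theorem fIdx_append_of_mem (gs : List String) (x g : String) (h : g ∈ gs) :
    fIdx (gs ++ [x]) g = fIdx gs g := by
  unfold fIdx
  rw [idxsOf_append]
  cases hl : idxsOf gs g with
  | nil => exact absurd hl (idxsOf_ne_nil gs g h)
  | cons a t => simp

theorem idxsOf_eq_nil_of_not_mem (gs : List String) (x : String) (h : x ∉ gs) :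
    idxsOf gs x = [] := by
  unfold idxsOf
  rw [List.filter_eq_nil_iff]
  intro i hi
  rw [mem_rngL] at hi
  simp only [beq_iff_eq]
  intro heq
  exact h (heq ▸ gI_mem gs i hi.1 hi.2)

theorem fIdx_bounds (gs : List String) (g : String) (h : g ∈ gs) :
    0 ≤ fIdx gs g ∧ fIdx gs g < (gs.length : Int) :=
  ((mem_idxsOf gs g _).1 (fIdx_mem gs g h)).1

theorem keys_pairwise_fIdx (gs : List String) :
    (keysOf gs).Pairwise (fun a b => fIdx gs a < fIdx gs b) := by
  induction gs using List.reverseRecOn with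
  | nil => simp [keysOf, PySem.Set.ofList_nil]
  | append_singleton gs x ih =>
    unfold keysOf at *
    rw [PySem.Set.ofList_append_singleton, PySem.Set.add_eq_ite]
    by_cases hx : x ∈ PySem.Set.ofList gs
    · rw [if_pos hx]
      refine ih.imp_of_mem ?_
      intro a b ha hb hab
      have ha' := (PySem.Set.mem_ofList gs a).1 ha
      have hb' := (PySem.Set.mem_ofList gs b).1 hb
      rwa [fIdx_append_of_mem gs x a ha', fIdx_append_of_mem gs x b hb']
    · rw [if_neg hx]
      rw [List.pairwise_append]
      refine ⟨ih.imp_of_mem ?_, List.pairwise_singleton _ _, ?_⟩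
      · intro a b ha hb hab
        have ha' := (PySem.Set.mem_ofList gs a).1 ha
        have hb' := (PySem.Set.mem_ofList gs b).1 hb
        rwa [fIdx_append_of_mem gs x a ha', fIdx_append_of_mem gs x b hb']
      · intro a ha b hb
        have hb' : b = x := by simpa using hb
        rw [hb']
        have ha' := (PySem.Set.mem_ofList gs a).1 ha
        rw [fIdx_append_of_mem gs x a ha']
        have hxval : fIdx (gs ++ [x]) x = (gs.length : Int) := by
          unfold fIdx
          rw [idxsOf_append, idxsOf_eq_nil_of_not_mem gs x
            (fun hmem => hx ((PySem.Set.mem_ofList gs x).2 hmem)), if_pos rfl]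
          rfl
        rw [hxval]
        exact (fIdx_bounds gs a ha').2

-- strictness of the two canonical sorts -------------------------------------------------

theorem sIdxs_pairwise_strict (genres : List String) (plays : List Int) (g : String) :
    (sIdxs genres plays g).Pairwise (fun i j => songKey plays i < songKey plays j) := by
  have h1 := PySem.List.sorted_pairwise (idxsOf genres g) (songKey plays)
  have hnd : (sIdxs genres plays g).Nodup :=
    (List.Perm.nodup_iff (PySem.List.sorted_perm (idxsOf genres g) (songKey plays) false)).2
      (idxsOf_nodup genres g)
  refine (h1.and hnd).imp ?_
  rintro i j ⟨hle, hne⟩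
  refine lt_of_le_of_ne hle (fun he => hne ?_)
  have := (toLex_inj (a := (-(pI plays i), i)) (b := (-(pI plays j), j))).1 he
  exact congrArg Prod.snd this

theorem mem_cgOf (genres : List String) (plays : List Int) (g : String) :
    g ∈ cgOf genres plays ↔ g ∈ genres := by
  unfold cgOf
  rw [PySem.List.mem_sorted]
  exact PySem.Set.mem_ofList genres g

theorem cg_nodup (genres : List String) (plays : List Int) : (cgOf genres plays).Nodup :=
  (List.Perm.nodup_iff (PySem.List.sorted_perm _ _ false)).2 (PySem.Set.nodup_ofList genres)

theorem cg_pairwise_strict (genres : List String) (plays : List Int) :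
    (cgOf genres plays).Pairwise
      (fun a b => gKey genres plays a < gKey genres plays b) := by
  have h1 := PySem.List.sorted_pairwise (keysOf genres) (gKey genres plays)
  have hnd := cg_nodup genres plays
  refine (List.Pairwise.and (h1 : (cgOf genres plays).Pairwise _) hnd).imp_of_mem ?_
  rintro a b ha hb ⟨hle, hne⟩
  refine lt_of_le_of_ne hle (fun he => hne ?_)
  have heq := (toLex_inj (a := (-(totOf genres plays a), fIdx genres a))
    (b := (-(totOf genres plays b), fIdx genres b))).1 he
  exact fIdx_inj genres a b ((mem_cgOf genres plays a).1 ha)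
    ((mem_cgOf genres plays b).1 hb) (congrArg Prod.snd heq)

-- positions in the dict (keysOf) versus first-appearance indices ------------------------

theorem enumerate_getElem {α : Type} (l : List α) (s : Int) (k : Nat)
    (hk : k < l.length) :
    (PySem.List.enumerate l s)[k]'(by rw [PySem.List.length_enumerate]; exact hk) =
      (s + k, l[k]) := by
  have hk' : k < (PySem.List.enumerate l s).length := by
    rw [PySem.List.length_enumerate]; exact hk
  have h1 : (PySem.List.enumerate l s)[k].1 = s + k := by
    have h := List.getElem_of_eq (PySem.List.map_fst_enumerate l s)
      (i := k) (by rw [List.length_map, PySem.List.length_enumerate]; exact hk)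
    simp only [List.getElem_map] at h
    rw [h, PySem.List.getElem_pyRange_one]
  have h2 : (PySem.List.enumerate l s)[k].2 = l[k] := by
    have h := List.getElem_of_eq (PySem.List.map_snd_enumerate l s)
      (i := k) (by rw [List.length_map, PySem.List.length_enumerate]; exact hk)
    simp only [List.getElem_map] at h
    exact h
  exact Prod.ext h1 h2

theorem enumerate_eq_map_idxOf (l : List String) (h : l.Nodup) :
    PySem.List.enumerate l = l.map (fun a => ((l.idxOf a : Int), a)) := by
  apply List.ext_getElem
  · rw [PySem.List.length_enumerate, List.length_map]
  · intro k hk1 hk2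
    have hk : k < l.length := by rw [PySem.List.length_enumerate] at hk1; exact hk1
    rw [enumerate_getElem l 0 k hk, List.getElem_map, List.Nodup.idxOf_getElem h k hk]
    simp

theorem fIdx_lt_iff_pos_lt (genres : List String) (a b : String)
    (ha : a ∈ keysOf genres) (hb : b ∈ keysOf genres) :
    fIdx genres a < fIdx genres b ↔
      (keysOf genres).idxOf a < (keysOf genres).idxOf b := by
  have hp := keys_pairwise_fIdx genres
  rw [List.pairwise_iff_getElem] at hp
  have hia := List.idxOf_lt_length_of_mem ha
  have hib := List.idxOf_lt_length_of_mem hb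
  have hga : (keysOf genres)[(keysOf genres).idxOf a] = a := List.getElem_idxOf _
  have hgb : (keysOf genres)[(keysOf genres).idxOf b] = b := List.getElem_idxOf _
  constructor
  · intro hf
    by_contra hc
    rcases Nat.lt_or_ge ((keysOf genres).idxOf b) ((keysOf genres).idxOf a) with hlt | hge
    · have := hp _ _ hib hia hlt
      rw [hga, hgb] at this; omega
    · have : (keysOf genres).idxOf a = (keysOf genres).idxOf b := by omega
      have hab : a = b := by
        rw [← hga, ← hgb]
        exact getElem_congr rfl this hia
      rw [hab] at hf; omega
  · intro hpos
    have := hp _ _ hia hib hpos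
    rwa [hga, hgb] at this

-- characterisation of A's song_dict ------------------------------------------------------

def dictA (genres : List String) (plays : List Int) : PySem.Dict String (List (Int × Int)) :=
  (rngL genres).foldl
    (fun d i => d.modify (PySem.List.pyGetD genres i "") []
      (· ++ [(i, PySem.List.pyGetD plays i 0)])) PySem.Dict.empty

theorem portA_fold_eq (genres : List String) (plays : List Int) :
    (PySem.List.pyRange 0 (PySem.List.len genres)).foldl
      (fun (d : PySem.Dict String (List (Int × Int))) (i : Int) =>
        match d.get? (PySem.List.pyGetD genres i "") with
        | some l => d.insert (PySem.List.pyGetD genres i "")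
            (l ++ [(i, PySem.List.pyGetD plays i 0)])
        | none   => d.insert (PySem.List.pyGetD genres i "")
            [(i, PySem.List.pyGetD plays i 0)]) PySem.Dict.empty
      = dictA genres plays := by
  unfold dictA rngL
  congr 1
  funext d i
  cases hd : d.get? (PySem.List.pyGetD genres i "") with
  | some l =>
    simp [hd, PySem.Dict.modify, PySem.Dict.getD_eq_get?_getD]
  | none =>
    simp [hd, PySem.Dict.modify, PySem.Dict.getD_eq_get?_getD]

theorem getD_dictA (genres : List String) (plays : List Int) (c : String) :
    (dictA genres plays).getD c [] = grpOf genres plays c := by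
  unfold dictA
  have h2 : (rngL genres).foldl
      (fun d i => d.modify (PySem.List.pyGetD genres i "")
        [] (· ++ [(i, PySem.List.pyGetD plays i 0)])) PySem.Dict.empty
    = ((rngL genres).map
        (fun j => (PySem.List.pyGetD genres j "", (j, PySem.List.pyGetD plays j 0)))).foldl
      (fun (d' : PySem.Dict String (List (Int × Int))) p => d'.modify p.1 [] (· ++ [p.2]))
      PySem.Dict.empty :=
    (List.foldl_map
      (f := fun j => (PySem.List.pyGetD genres j "", (j, PySem.List.pyGetD plays j 0)))
      (g := fun (d' : PySem.Dict String (List (Int × Int))) p => d'.modify p.1 [] (· ++ [p.2]))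
      (l := rngL genres) (init := PySem.Dict.empty)).symm
  rw [h2, PySem.Dict.getD_foldl_modify_append, PySem.Dict.getD_empty,
    List.nil_append, List.filter_map, List.map_map]
  rfl

theorem keys_dictA (genres : List String) (plays : List Int) :
    (dictA genres plays).keys = keysOf genres := by
  unfold dictA
  rw [PySem.Dict.keys_foldl_modify_key (rngL genres)
    (fun i => PySem.List.pyGetD genres i "") []
    (fun _ i => (· ++ [(i, PySem.List.pyGetD plays i 0)])) PySem.Dict.empty]
  rw [PySem.Dict.keys_empty]
  show PySem.Set.update PySem.Set.empty _ = _
  rw [PySem.Set.update_empty]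
  unfold rngL keysOf
  rw [PySem.List.map_pyGetD_pyRange_zero genres ""]

theorem values_dictA (genres : List String) (plays : List Int) :
    (dictA genres plays).values = (keysOf genres).map (grpOf genres plays) := by
  have hnd : (dictA genres plays).keys.Nodup := by
    rw [keys_dictA]; exact PySem.Set.nodup_ofList genres
  rw [PySem.Dict.values_eq_map_keys (dictA genres plays) hnd [], keys_dictA]
  exact List.map_congr_left (fun g _ => getD_dictA genres plays g)

theorem size_dictA (genres : List String) (plays : List Int) :
    (dictA genres plays).size = (keysOf genres).length := by
  show (dictA genres plays).items.length = _
  have : (dictA genres plays).keys.length = (keysOf genres).length := by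
    rw [keys_dictA]
  rwa [show (dictA genres plays).keys = (dictA genres plays).items.map (·.1) from rfl,
    List.length_map] at this

-- the sorted "high" list -----------------------------------------------------------------

theorem enumerate_map {α β : Type} (f : α → β) (l : List α) :
    ∀ s : Int, PySem.List.enumerate (l.map f) s =
      (PySem.List.enumerate l s).map (fun x => (x.1, f x.2)) := by
  induction l with
  | nil => intro s; rfl
  | cons x t ih =>
    intro s
    rw [List.map_cons, PySem.List.enumerate_cons, PySem.List.enumerate_cons, ih (s + 1),
      List.map_cons]

theorem sumSecond_grp (genres : List String) (plays : List Int) (g : String) :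
    sumSecond (grpOf genres plays g) = totOf genres plays g := by
  unfold sumSecond grpOf totOf
  rw [PySem.List.foldl_add, List.map_map]
  simp
  rfl

theorem keys_pairwise_pos (genres : List String) :
    (keysOf genres).Pairwise
      (fun a b => (keysOf genres).idxOf a < (keysOf genres).idxOf b) := by
  unfold keysOf
  rw [List.pairwise_iff_getElem]
  intro i j hi hj hij
  rw [List.Nodup.idxOf_getElem (PySem.Set.nodup_ofList genres) i hi,
    List.Nodup.idxOf_getElem (PySem.Set.nodup_ofList genres) j hj]
  exact hij

def hfn (genres : List String) (plays : List Int) (g : String) : Int × Int :=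
  (((keysOf genres).idxOf g : Int), totOf genres plays g)

theorem high_eq (genres : List String) (plays : List Int) :
    (PySem.List.enumerate ((dictA genres plays).values)).map
      (fun iv => (iv.1, sumSecond iv.2)) =
      (keysOf genres).map (hfn genres plays) := by
  rw [values_dictA, enumerate_map, enumerate_eq_map_idxOf (keysOf genres)
      (show (keysOf genres).Nodup from PySem.Set.nodup_ofList genres),
    List.map_map, List.map_map]
  refine List.map_congr_left ?_
  intro g _
  show (((keysOf genres).idxOf g : Int), sumSecond (grpOf genres plays g)) = _
  rw [sumSecond_grp]
  rfl

theorem highS_eq (genres : List String) (plays : List Int) :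
    PySem.List.sorted ((keysOf genres).map (hfn genres plays)) (fun x => x.2) true =
      (cgOf genres plays).map (hfn genres plays) := by
  rw [stable_rev_lex _ _ (fun x => x.1) ?_]
  · refine PySem.List.sorted_eq_of_perm_of_pairwise_lt _ _ _
      ((PySem.List.sorted_perm (keysOf genres) (gKey genres plays) false).map _) ?_
    rw [List.pairwise_map]
    refine (cg_pairwise_strict genres plays).imp_of_mem ?_
    intro a b ha hb hab
    have ha' := (mem_cgOf genres plays a).1 ha
    have hb' := (mem_cgOf genres plays b).1 hb
    have ha'' : a ∈ keysOf genres := (PySem.Set.mem_ofList genres a).2 ha'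
    have hb'' : b ∈ keysOf genres := (PySem.Set.mem_ofList genres b).2 hb'
    unfold gKey at hab
    rw [Prod.Lex.toLex_lt_toLex] at hab
    dsimp only [hfn]
    rw [Prod.Lex.toLex_lt_toLex]
    dsimp only
    rcases hab with h | ⟨h1, h2⟩
    · left; omega
    · right
      constructor
      · omega
      · have := (fIdx_lt_iff_pos_lt genres a b ha'' hb'').1 h2
        exact_mod_cast this
  · rw [List.pairwise_map]
    refine (keys_pairwise_pos genres).imp ?_
    intro a b h
    dsimp only [hfn]
    exact_mod_cast h

-- per-genre block of A's output loop -----------------------------------------------------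

theorem sIdxs_singleton (genres : List String) (plays : List Int) (g : String) (i0 : Int)
    (h : idxsOf genres g = [i0]) : sIdxs genres plays g = [i0] := by
  unfold sIdxs
  rw [h]
  rfl

theorem grp_pairwise_fst (genres : List String) (plays : List Int) (g : String) :
    (grpOf genres plays g).Pairwise (fun a b => a.1 < b.1) := by
  unfold grpOf
  rw [List.pairwise_map]
  exact idxsOf_pairwise genres g

theorem catS_eq (genres : List String) (plays : List Int) (g : String) :
    PySem.List.sorted (grpOf genres plays g) (fun x => x.2) true =
      (sIdxs genres plays g).map (fun i => (i, pI plays i)) := by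
  rw [stable_rev_lex _ _ (fun x => x.1) (grp_pairwise_fst genres plays g)]
  refine PySem.List.sorted_eq_of_perm_of_pairwise_lt _ _ _
    ((PySem.List.sorted_perm (idxsOf genres g) (songKey plays) false).map _) ?_
  rw [List.pairwise_map]
  refine (sIdxs_pairwise_strict genres plays g).imp ?_
  intro a b h
  exact h

theorem blockA_eq (genres : List String) (plays : List Int) (g : String) (hg : g ∈ genres) :
    (if (grpOf genres plays g).length == 1 then
      [(PySem.List.pyGetD (grpOf genres plays g) 0 (0, 0)).1]
    else
      [(PySem.List.pyGetD
          (PySem.List.sorted (grpOf genres plays g) (fun x => x.2) true) 0 (0, 0)).1,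
       (PySem.List.pyGetD
          (PySem.List.sorted (grpOf genres plays g) (fun x => x.2) true) 1 (0, 0)).1])
      = (sIdxs genres plays g).take 2 := by
  have hlen : (grpOf genres plays g).length = (idxsOf genres g).length := by
    unfold grpOf; rw [List.length_map]
  have hnn : idxsOf genres g ≠ [] := idxsOf_ne_nil genres g hg
  by_cases h1 : (idxsOf genres g).length = 1
  · obtain ⟨i0, hi0⟩ := List.length_eq_one_iff.1 h1
    rw [if_pos (by rw [hlen, h1]; rfl)]
    rw [sIdxs_singleton genres plays g i0 hi0]
    unfold grpOf
    rw [hi0]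
    rfl
  · have h2 : 2 ≤ (idxsOf genres g).length := by
      have : (idxsOf genres g).length ≠ 0 := by
        intro h; exact hnn (List.eq_nil_of_length_eq_zero h)
      omega
    rw [if_neg (by rw [hlen]; simpa using h1)]
    rw [catS_eq genres plays g]
    have hslen : 2 ≤ (sIdxs genres plays g).length := by
      unfold sIdxs; rw [PySem.List.length_sorted]; exact h2
    obtain ⟨a, t, ht⟩ : ∃ a t, sIdxs genres plays g = a :: t := by
      cases hs : sIdxs genres plays g with
      | nil => rw [hs] at hslen; simp at hslen
      | cons a t => exact ⟨a, t, rfl⟩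
    obtain ⟨b, t', ht'⟩ : ∃ b t', t = b :: t' := by
      cases hs : t with
      | nil => rw [ht, hs] at hslen; simp at hslen
      | cons b t' => exact ⟨b, t', rfl⟩
    rw [ht, ht']
    simp [pysem]

-- A's program equals the canonical answer ------------------------------------------------

theorem solution_eq_ansC (genres : List String) (plays : List Int)
    (_hpre : genres.length ≤ plays.length) :
    solution genres plays = ansC genres plays := by
  simp only [solution]
  rw [portA_fold_eq, high_eq, highS_eq, keys_dictA]
  simp only [getD_dictA]
  have hsz : (((dictA genres plays).size : Nat) : Int)
      = PySem.List.len ((cgOf genres plays).map (hfn genres plays)) := by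
    rw [size_dictA, PySem.List.len_eq, List.length_map]
    unfold cgOf
    rw [PySem.List.length_sorted]
  rw [hsz]
  rw [PySem.List.foldl_pyRange_zero_pyGetD ((cgOf genres plays).map (hfn genres plays))
    ((0 : Int), (0 : Int))
    (fun ans h =>
      if ((grpOf genres plays (PySem.List.pyGetD (keysOf genres) h.1 "")).length == 1) = true
      then ans ++ [(PySem.List.pyGetD
          (grpOf genres plays (PySem.List.pyGetD (keysOf genres) h.1 "")) 0 (0, 0)).1]
      else ans ++ [(PySem.List.pyGetD (PySem.List.sorted
            (grpOf genres plays (PySem.List.pyGetD (keysOf genres) h.1 ""))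
            (fun x => x.2) true) 0 (0, 0)).1,
          (PySem.List.pyGetD (PySem.List.sorted
            (grpOf genres plays (PySem.List.pyGetD (keysOf genres) h.1 ""))
            (fun x => x.2) true) 1 (0, 0)).1]) []]
  have hb : (fun (ans : List Int) (h : Int × Int) =>
      if ((grpOf genres plays (PySem.List.pyGetD (keysOf genres) h.1 "")).length == 1) = true
      then ans ++ [(PySem.List.pyGetD
          (grpOf genres plays (PySem.List.pyGetD (keysOf genres) h.1 "")) 0 (0, 0)).1]
      else ans ++ [(PySem.List.pyGetD (PySem.List.sorted
            (grpOf genres plays (PySem.List.pyGetD (keysOf genres) h.1 ""))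
            (fun x => x.2) true) 0 (0, 0)).1,
          (PySem.List.pyGetD (PySem.List.sorted
            (grpOf genres plays (PySem.List.pyGetD (keysOf genres) h.1 ""))
            (fun x => x.2) true) 1 (0, 0)).1])
    = (fun ans h => ans ++
      (if ((grpOf genres plays (PySem.List.pyGetD (keysOf genres) h.1 "")).length == 1) = true
      then [(PySem.List.pyGetD
          (grpOf genres plays (PySem.List.pyGetD (keysOf genres) h.1 "")) 0 (0, 0)).1]
      else [(PySem.List.pyGetD (PySem.List.sorted
            (grpOf genres plays (PySem.List.pyGetD (keysOf genres) h.1 ""))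
            (fun x => x.2) true) 0 (0, 0)).1,
          (PySem.List.pyGetD (PySem.List.sorted
            (grpOf genres plays (PySem.List.pyGetD (keysOf genres) h.1 ""))
            (fun x => x.2) true) 1 (0, 0)).1])) := by
    funext ans h
    split <;> rfl
  rw [hb, PySem.List.foldl_append_eq_flatMap, List.nil_append, List.flatMap_map]
  unfold ansC
  refine List.flatMap_congr ?_
  intro g hg
  have hgmem : g ∈ genres := (mem_cgOf genres plays g).1 hg
  have hkmem : g ∈ keysOf genres := (PySem.Set.mem_ofList genres g).2 hgmem
  have hilt := List.idxOf_lt_length_of_mem hkmem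
  have hgg : PySem.List.pyGetD (keysOf genres) ((hfn genres plays g).1) "" = g := by
    dsimp only [hfn]
    rw [PySem.List.pyGetD_eq_getElem (keysOf genres) "" (by omega) (by exact_mod_cast hilt)]
    simp only [Int.toNat_natCast]
    exact List.getElem_idxOf hilt
  rw [hgg]
  exact blockA_eq genres plays g hgmem

-- B-side: the two bookkeeping dicts -----------------------------------------------------

theorem enumZip_eq (genres : List String) (plays : List Int)
    (hpre : genres.length ≤ plays.length) :
    PySem.List.enumerate (genres.zip plays) =
      (rngL genres).map (fun i => (i, (gI genres i, pI plays i))) := by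
  apply List.ext_getElem
  · rw [PySem.List.length_enumerate, List.length_zip, List.length_map]
    unfold rngL
    rw [PySem.List.length_pyRange_one, PySem.List.len_eq]
    omega
  · intro k hk1 hk2
    have hkg : k < genres.length := by
      rw [PySem.List.length_enumerate, List.length_zip] at hk1; omega
    have hkz : k < (genres.zip plays).length := by rw [List.length_zip]; omega
    rw [enumerate_getElem (genres.zip plays) 0 k hkz, List.getElem_map, List.getElem_zip]
    unfold rngL
    rw [PySem.List.getElem_pyRange_one]
    simp only [zero_add]
    rw [gI_getElem genres k hkg, pI_getElem plays k (by omega)]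

theorem modify_sum_getD (c : String) :
    ∀ (l : List (Int × (String × Int))) (d : PySem.Dict String Int),
    (l.foldl (fun d x => d.modify x.2.1 0 (· + x.2.2)) d).getD c 0 =
      d.getD c 0 + ((l.filter (fun x => x.2.1 == c)).map (fun x => x.2.2)).sum := by
  intro l
  induction l with
  | nil => intro d; simp
  | cons x t ih =>
    intro d
    rw [List.foldl_cons, ih, List.filter_cons]
    by_cases hc : x.2.1 = c
    · rw [if_pos (by simpa using hc), List.map_cons, List.sum_cons,
        PySem.Dict.getD_modify]
      rw [if_pos hc.symm, hc]
      ring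
    · rw [if_neg (by simpa using hc), PySem.Dict.getD_modify, if_neg (fun h => hc h.symm)]

theorem first_get? (c : String) :
    ∀ (l : List (Int × (String × Int))) (d : PySem.Dict String Int),
    (l.foldl (fun d x => if d.contains x.2.1 then d else d.insert x.2.1 x.1) d).get? c =
      (d.get? c).or ((l.find? (fun x => x.2.1 == c)).map (fun x => x.1)) := by
  intro l
  induction l with
  | nil => intro d; simp
  | cons x t ih =>
    intro d
    rw [List.foldl_cons]
    by_cases hx : d.contains x.2.1 = true
    · rw [if_pos hx, ih]
      by_cases hc : x.2.1 = c
      · obtain ⟨w, hw⟩ : ∃ w, d.get? c = some w := by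
          rw [← hc]
          cases hg : d.get? x.2.1 with
          | none =>
            rw [PySem.Dict.get?_eq_none_iff_contains] at hg
            rw [hg] at hx; cases hx
          | some w => exact ⟨w, rfl⟩
        rw [hw]
        simp
      · rw [List.find?_cons_of_neg (by simpa using hc)]
    · rw [if_neg (by simp at hx; simp [hx]), ih]
      by_cases hc : x.2.1 = c
      · rw [← hc, PySem.Dict.get?_insert_self,
          show d.get? x.2.1 = none from
            (PySem.Dict.get?_eq_none_iff_contains d x.2.1).2 (by simpa using hx),
          List.find?_cons_of_pos (by simp)]
        simp
      · rw [PySem.Dict.get?_insert_of_ne d _ (fun h => hc h.symm),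
          List.find?_cons_of_neg (by simpa using hc)]

theorem totalLookup (genres : List String) (plays : List Int)
    (hpre : genres.length ≤ plays.length) (c : String) :
    ((PySem.List.enumerate (genres.zip plays)).foldl
      (fun d x => d.modify x.2.1 0 (· + x.2.2)) PySem.Dict.empty).getD c 0 =
      totOf genres plays c := by
  rw [enumZip_eq genres plays hpre, modify_sum_getD, PySem.Dict.getD_empty,
    List.filter_map, List.map_map]
  unfold totOf idxsOf
  simp [Function.comp_def]

theorem firstLookup (genres : List String) (plays : List Int)
    (hpre : genres.length ≤ plays.length) (g : String) (hg : g ∈ genres) :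
    ((PySem.List.enumerate (genres.zip plays)).foldl
      (fun d x => if d.contains x.2.1 then d else d.insert x.2.1 x.1) PySem.Dict.empty).getD g 0 =
      fIdx genres g := by
  rw [PySem.Dict.getD_eq_get?_getD, first_get? g, PySem.Dict.get?_empty, Option.none_or,
    enumZip_eq genres plays hpre, List.find?_map]
  have hfind : (rngL genres).find?
      ((fun x : Int × (String × Int) => x.2.1 == g) ∘
        (fun i => (i, (gI genres i, pI plays i)))) = (idxsOf genres g).head? := by
    rw [← List.head?_filter]
    rfl
  rw [hfind]
  cases hl : idxsOf genres g with
  | nil => exact absurd hl (idxsOf_ne_nil genres g hg)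
  | cons a t =>
    unfold fIdx
    rw [hl]
    rfl

-- B-side: the globally sorted index list equals the canonical block list -----------------

def KC (genres : List String) (plays : List Int) (i : Int) :
    Int ×ₗ (Int ×ₗ (Int ×ₗ Int)) :=
  toLex (-(totOf genres plays (gI genres i)),
    toLex (fIdx genres (gI genres i), toLex (-(pI plays i), i)))

theorem partition_perm (k : Int → String) :
    ∀ (gs : List String) (l : List Int), gs.Nodup → (∀ i ∈ l, k i ∈ gs) →
    (gs.flatMap (fun g => l.filter (fun i => k i == g))).Perm l := by
  intro gs
  induction gs with
  | nil =>
    intro l _ hcov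
    have : l = [] := List.eq_nil_iff_forall_not_mem.2 (fun x hx => by
      have := hcov x hx; simp at this)
    rw [this]; rfl
  | cons g gs ih =>
    intro l hnd hcov
    rw [List.flatMap_cons]
    have hstep : ∀ g' ∈ gs, l.filter (fun i => k i == g') =
        (l.filter (fun i => !(k i == g))).filter (fun i => k i == g') := by
      intro g' hg'
      have hne : g' ≠ g := fun h => (List.pairwise_cons.1 hnd).1 g' hg' h.symm
      rw [List.filter_filter]
      apply List.filter_congr
      intro i _
      by_cases hki : k i = g'
      · simp [hki, hne]
      · simp [hki]
    have hflat : gs.flatMap (fun g' => l.filter (fun i => k i == g')) =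
        gs.flatMap (fun g' => (l.filter (fun i => !(k i == g))).filter
          (fun i => k i == g')) := List.flatMap_congr hstep
    rw [hflat]
    have hsub : (gs.flatMap (fun g' => (l.filter (fun i => !(k i == g))).filter
        (fun i => k i == g'))).Perm (l.filter (fun i => !(k i == g))) := by
      apply ih _ (List.Pairwise.of_cons hnd)
      intro i hi
      rw [List.mem_filter] at hi
      have := hcov i hi.1
      rcases List.mem_cons.1 this with h | h
      · exfalso; rw [h] at hi; simpa using hi.2
      · exact h
    exact (List.Perm.append_left (l.filter (fun i => k i == g)) hsub).trans
      (List.filter_append_perm _ l)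

theorem ysFull_perm (genres : List String) (plays : List Int) :
    ((cgOf genres plays).flatMap (fun g => sIdxs genres plays g)).Perm (rngL genres) := by
  have p1 : ((cgOf genres plays).flatMap (fun g => sIdxs genres plays g)).Perm
      ((cgOf genres plays).flatMap (fun g => idxsOf genres g)) :=
    List.Perm.flatMap_left _ (fun g _ => PySem.List.sorted_perm _ _ false)
  have p2 : ((cgOf genres plays).flatMap (fun g => idxsOf genres g)).Perm
      ((keysOf genres).flatMap (fun g => idxsOf genres g)) :=
    List.Perm.flatMap_right _ (PySem.List.sorted_perm _ _ false)
  have p3 : ((keysOf genres).flatMap (fun g => idxsOf genres g)).Perm (rngL genres) := by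
    unfold idxsOf
    apply partition_perm (fun i => gI genres i) (keysOf genres) (rngL genres)
      (PySem.Set.nodup_ofList genres)
    intro i hi
    rw [mem_rngL] at hi
    exact (PySem.Set.mem_ofList genres _).2 (gI_mem genres i hi.1 hi.2)
  exact (p1.trans p2).trans p3

theorem ysFull_pairwise (genres : List String) (plays : List Int) :
    ((cgOf genres plays).flatMap (fun g => sIdxs genres plays g)).Pairwise
      (fun i j => KC genres plays i < KC genres plays j) := by
  rw [List.flatMap_def, List.pairwise_flatten]
  constructor
  · intro L hL
    obtain ⟨g, hg, rfl⟩ := List.mem_map.1 hL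
    refine (sIdxs_pairwise_strict genres plays g).imp_of_mem ?_
    intro i j hi hj hij
    have hgi : gI genres i = g :=
      ((mem_idxsOf genres g i).1 ((PySem.List.mem_sorted _ _ _ _).1 hi)).2
    have hgj : gI genres j = g :=
      ((mem_idxsOf genres g j).1 ((PySem.List.mem_sorted _ _ _ _).1 hj)).2
    unfold KC
    rw [hgi, hgj, Prod.Lex.toLex_lt_toLex]
    right
    refine ⟨rfl, ?_⟩
    rw [Prod.Lex.toLex_lt_toLex]
    right
    exact ⟨rfl, hij⟩
  · rw [List.pairwise_map]
    refine (cg_pairwise_strict genres plays).imp_of_mem ?_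
    intro a b ha hb hab i hi j hj
    have hgi : gI genres i = a :=
      ((mem_idxsOf genres a i).1 ((PySem.List.mem_sorted _ _ _ _).1 hi)).2
    have hgj : gI genres j = b :=
      ((mem_idxsOf genres b j).1 ((PySem.List.mem_sorted _ _ _ _).1 hj)).2
    unfold gKey at hab
    rw [Prod.Lex.toLex_lt_toLex] at hab
    unfold KC
    rw [hgi, hgj, Prod.Lex.toLex_lt_toLex]
    rcases hab with h | ⟨h1, h2⟩
    · left; omega
    · right
      refine ⟨by omega, ?_⟩
      rw [Prod.Lex.toLex_lt_toLex]
      left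
      exact h2

-- B-side: the counter-limited pass keeps the first two of each block ---------------------

def stepB (genres : List String) :
    (List Int × PySem.Dict String Int) → Int → (List Int × PySem.Dict String Int) :=
  fun ac i =>
    if ac.2.getD (PySem.List.pyGetD genres i "") 0 < 2 then
      (ac.1 ++ [i], ac.2.insert (PySem.List.pyGetD genres i "")
        (ac.2.getD (PySem.List.pyGetD genres i "") 0 + 1))
    else ac

theorem pass_block (genres : List String) (g : String) :
    ∀ (l : List Int) (c : Nat) (acc : List Int) (cnt : PySem.Dict String Int),
    (∀ i ∈ l, gI genres i = g) → cnt.getD g 0 = (c : Int) →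
    (l.foldl (stepB genres) (acc, cnt)).1 = acc ++ l.take (2 - c) ∧
    (∀ c', c' ≠ g → (l.foldl (stepB genres) (acc, cnt)).2.get? c' = cnt.get? c') := by
  intro l
  induction l with
  | nil => intro c acc cnt _ _; simp
  | cons i t ih =>
    intro c acc cnt hmem hc
    have hgi : gI genres i = g := hmem i (List.mem_cons_self)
    rw [List.foldl_cons]
    by_cases hcc : c < 2
    · have hstep : stepB genres (acc, cnt) i = (acc ++ [i], cnt.insert g ((c : Int) + 1)) := by
        unfold stepB
        rw [show PySem.List.pyGetD genres i "" = g from hgi]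
        dsimp only
        rw [hc, if_pos (by exact_mod_cast hcc)]
      rw [hstep]
      have hins : (cnt.insert g ((c : Int) + 1)).getD g 0 = ((c + 1 : Nat) : Int) := by
        rw [PySem.Dict.getD_insert_self]; push_cast; ring
      obtain ⟨ih1, ih2⟩ := ih (c + 1) (acc ++ [i]) (cnt.insert g ((c : Int) + 1))
        (fun j hj => hmem j (List.mem_cons_of_mem _ hj)) hins
      constructor
      · rw [ih1, show 2 - c = (2 - (c + 1)) + 1 from by omega, List.take_succ_cons,
          List.append_assoc, List.singleton_append]
      · intro c' hc'
        rw [ih2 c' hc', PySem.Dict.get?_insert_of_ne cnt _ hc']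
    · have hstep : stepB genres (acc, cnt) i = (acc, cnt) := by
        unfold stepB
        rw [show PySem.List.pyGetD genres i "" = g from hgi]
        dsimp only
        rw [hc, if_neg (by omega)]
      rw [hstep]
      obtain ⟨ih1, ih2⟩ := ih c acc cnt
        (fun j hj => hmem j (List.mem_cons_of_mem _ hj)) hc
      refine ⟨?_, ih2⟩
      rw [ih1, show 2 - c = 0 from by omega]
      simp

theorem pass_all (genres : List String) (plays : List Int) :
    ∀ (gs : List String) (acc : List Int) (cnt : PySem.Dict String Int),
    gs.Nodup → (∀ g ∈ gs, cnt.contains g = false) → (∀ g ∈ gs, g ∈ genres) →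
    ((gs.flatMap (fun g => sIdxs genres plays g)).foldl (stepB genres) (acc, cnt)).1 =
      acc ++ gs.flatMap (fun g => (sIdxs genres plays g).take 2) := by
  intro gs
  induction gs with
  | nil => intro acc cnt _ _ _; simp
  | cons g gs ih =>
    intro acc cnt hnd hcont hmem
    rw [List.flatMap_cons, List.foldl_append]
    have h0 : cnt.getD g 0 = ((0 : Nat) : Int) := by
      rw [PySem.Dict.getD_of_not_contains cnt 0 (hcont g (List.mem_cons_self))]
      rfl
    obtain ⟨h1, h2⟩ := pass_block genres g (sIdxs genres plays g) 0 acc cnt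
      (fun i hi => ((mem_idxsOf genres g i).1 ((PySem.List.mem_sorted _ _ _ _).1 hi)).2) h0
    set r := (sIdxs genres plays g).foldl (stepB genres) (acc, cnt) with hr
    have hrpair : r = (r.1, r.2) := rfl
    rw [hrpair, ih r.1 r.2 (List.Pairwise.of_cons hnd) ?_
      (fun g' hg' => hmem g' (List.mem_cons_of_mem _ hg'))]
    · rw [h1, List.flatMap_cons, List.append_assoc]
    · intro g' hg'
      have hne : g' ≠ g := fun h => (List.pairwise_cons.1 hnd).1 g' hg' h.symm
      rw [← PySem.Dict.get?_eq_none_iff_contains, h2 g' hne,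
        PySem.Dict.get?_eq_none_iff_contains]
      exact hcont g' (List.mem_cons_of_mem _ hg')

-- B's program equals the canonical answer ------------------------------------------------

theorem solution_alt_eq_ansC (genres : List String) (plays : List Int)
    (hpre : genres.length ≤ plays.length) :
    solution_alt genres plays = ansC genres plays := by
  simp only [solution_alt]
  rw [PySem.List.foldl_prod_mk
    (fun (d : PySem.Dict String Int) (x : Int × (String × Int)) => d.modify x.2.1 0 (· + x.2.2))
    (fun (d : PySem.Dict String Int) (x : Int × (String × Int)) =>
      if d.contains x.2.1 then d else d.insert x.2.1 x.1)
    (PySem.List.enumerate (genres.zip plays)) PySem.Dict.empty PySem.Dict.empty]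
  dsimp only
  refine Eq.trans (b := (List.foldl (stepB genres) ([], PySem.Dict.empty)
      ((cgOf genres plays).flatMap (fun g => sIdxs genres plays g))).1)
    (congrArg
      (fun L : List Int => (List.foldl (stepB genres) ([], PySem.Dict.empty) L).1) ?_) ?_
  · refine Eq.trans (sorted_congr _ _ (KC genres plays) false ?_) ?_
    · intro i hi
      have hb := (mem_rngL genres i).1 hi
      have hgm : gI genres i ∈ genres := gI_mem genres i hb.1 hb.2
      unfold KC gI pI
      rw [totalLookup genres plays hpre, firstLookup genres plays hpre (PySem.List.pyGetD genres i "") hgm]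
    · exact PySem.List.sorted_eq_of_perm_of_pairwise_lt _ _ _
        (ysFull_perm genres plays) (ysFull_pairwise genres plays)
  · rw [pass_all genres plays (cgOf genres plays) [] PySem.Dict.empty
      (cg_nodup genres plays) (fun g _ => PySem.Dict.contains_empty g)
      (fun g hg => (mem_cgOf genres plays g).1 hg)]
    unfold ansC
    rw [List.nil_append]

-- ===== VERDICT (by name: the statement is the Claim_ definition above) =====
theorem solution_spec : Claim_equal_solution := by
  intro genres plays _ hpre
  unfold Spec_solution
  rw [solution_eq_ansC genres plays hpre, solution_alt_eq_ansC genres plays hpre]
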